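-- pv_equiv track=rewrite | github.com/tonyyo/- | Python算法指南/247_用栈模拟汉诺塔问题_用队列实现更好_得用多个栈.py | popleft
-- ===== SOURCE A (Python) =====
-- def popleft(stack1):
--     i = 0
--     stack2 = []
--     stack3 = []
--     while len(stack1) > 0:
--         stack2.append(stack1.pop())
--     top = stack2.pop()
--     while len(stack2) > 0:
--         stack3.append(stack2.pop())
--     return top, stack3
-- ===== SOURCE B (Python) =====
-- def popleft(stack1):
--     top = stack1[0]
--     rest = stack1[1:]
--     stack1.clear()
--     return top, rest
-- ===== Notes on version B (the rewrite author's own statement) =====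
-- stated objective: simpler
-- what changed: Replaces the three while-loops over two auxiliary stacks with direct indexing/slicing (top = stack1[0], rest = stack1[1:]) plus stack1.clear() to reproduce A's in-place emptying of the argument.
import Mathlib
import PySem

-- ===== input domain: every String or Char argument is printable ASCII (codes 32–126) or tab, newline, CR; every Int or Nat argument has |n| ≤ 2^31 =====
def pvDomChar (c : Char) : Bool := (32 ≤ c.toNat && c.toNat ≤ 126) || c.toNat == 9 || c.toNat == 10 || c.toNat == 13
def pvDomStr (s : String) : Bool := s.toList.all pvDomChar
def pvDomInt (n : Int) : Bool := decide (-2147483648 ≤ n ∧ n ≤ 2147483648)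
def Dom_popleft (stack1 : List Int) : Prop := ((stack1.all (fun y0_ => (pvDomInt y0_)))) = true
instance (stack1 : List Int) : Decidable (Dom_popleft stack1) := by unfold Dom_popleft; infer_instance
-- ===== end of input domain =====

-- B replaces A's three pop-loops over two auxiliary stacks with direct head/tail access
-- (simpler decomposition). Both A and B empty the argument list in place (a side effect
-- not modelled here); the equivalence proved is about the RETURN value.

-- ===== PORT A =====
-- while len(s) > 0: t.append(s.pop())   — pops from the END of s, appends to t
def popDrain (s t : List Int) : List Int :=
  if h : s = [] then t
  else popDrain s.dropLast (t ++ [s.getLast h])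
termination_by s.length
decreasing_by
  simp [List.length_dropLast]
  exact List.length_pos_iff.mpr h

def popleft (stack1 : List Int) : Int × List Int :=
  let stack2 := popDrain stack1 []
  -- top = stack2.pop(): raises IndexError when stack2 is empty (excluded by Pre_)
  let top := stack2.getLast?.getD 0
  let stack2' := stack2.dropLast
  let stack3 := popDrain stack2' []
  (top, stack3)

-- ===== PORT B =====
def popleft_alt (stack1 : List Int) : Int × List Int :=
  -- top = stack1[0] (IndexError on empty, excluded by Pre_); rest = stack1[1:]
  ((PySem.List.pyGet? stack1 0).getD 0, PySem.List.slice stack1 (some 1) none)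

-- ===== PRECONDITION & SPEC =====
-- A raises IndexError on the empty list (stack2.pop() on empty), as does B (stack1[0]).
def Pre_popleft (stack1 : List Int) : Prop := stack1 ≠ []
instance (stack1 : List Int) : Decidable (Pre_popleft stack1) := by unfold Pre_popleft; infer_instance
def pvWitness_popleft : List Int := [1, 2, 3]

def Spec_popleft (stack1 : List Int) (out : Int × List Int) : Prop := out = popleft_alt stack1
instance (stack1 : List Int) (out : Int × List Int) : Decidable (Spec_popleft stack1 out) := by unfold Spec_popleft; infer_instance

-- ===== CLAIM (what is proved, stated in full; the proofs are below) =====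
def Claim_equal_popleft : Prop := ∀ (stack1 : List Int), Dom_popleft stack1 → Pre_popleft stack1 → Spec_popleft stack1 (popleft stack1)

-- ===== LEMMAS AND PROOFS =====
theorem popDrain_eq (s t : List Int) : popDrain s t = t ++ s.reverse := by
  fun_induction popDrain s t with
  | case1 h => simp
  | case2 s t h ih =>
      rw [ih]
      conv_rhs => rw [← s.dropLast_concat_getLast h]
      simp

theorem popleft_alt_cons (x : Int) (xs : List Int) :
    popleft_alt (x :: xs) = (x, xs) := by
  simp [popleft_alt, PySem.List.pyGet?, PySem.List.pyIdx?, PySem.List.slice_from_one]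

-- ===== VERDICT (by name: the statement is the Claim_ definition above) =====
theorem popleft_spec : Claim_equal_popleft := by
  intro stack1 _ hpre
  obtain ⟨x, xs, rfl⟩ := List.exists_cons_of_ne_nil hpre
  unfold Spec_popleft popleft
  rw [popleft_alt_cons]
  simp only [popDrain_eq, List.nil_append, List.reverse_cons]
  simp
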